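-- pv_equiv track=rewrite | github.com/Purvanshjain23/Repo_Indexing | Documentation_Generators/full_repo_analysis.py | calculate_function_loc
-- ===== SOURCE A (Python) =====
-- from typing import List, Dict, Tuple, Set
--
-- def calculate_function_loc(lines: List[str], context_map: Dict[int, str]) -> Dict[str, Dict[str, int]]:
--     """Calculate actual LOC per function for CL programs"""
--     function_loc = {}
--
--     # Initialize all functions
--     all_functions = set(context_map.values())
--     for func in all_functions:
--         function_loc[func] = {'total_lines': 0, 'code_lines': 0, 'comment_lines': 0, 'blank_lines': 0}
--
--     # Count lines per function
--     for line_num, line in enumerate(lines, 1):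
--         function_name = context_map.get(line_num, "MAIN")
--         stripped = line.strip()
--
--         function_loc[function_name]['total_lines'] += 1
--
--         if not stripped:
--             function_loc[function_name]['blank_lines'] += 1
--         elif (stripped.startswith('/*') or  # CL block comments
--               stripped.startswith('//')):   # C-style comments
--             function_loc[function_name]['comment_lines'] += 1
--         else:
--             function_loc[function_name]['code_lines'] += 1
--
--     return function_loc
-- ===== SOURCE B (Python) =====
-- def calculate_function_loc(lines, context_map):
--     """Calculate actual LOC per function for CL programs (bucket lines per function, then count in aggregate)."""
--     function_loc = {func: {'total_lines': 0, 'code_lines': 0, 'comment_lines': 0, 'blank_lines': 0}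
--                     for func in set(context_map.values())}
--
--     buckets = {}
--     for line_num, line in enumerate(lines, 1):
--         buckets.setdefault(context_map.get(line_num, "MAIN"), []).append(line)
--
--     for func, mine in buckets.items():
--         blank = len([l for l in mine if not l.strip()])
--         comment = len([l for l in mine if l.strip().startswith(('/*', '//'))])
--         entry = function_loc[func]
--         entry['total_lines'] = len(mine)
--         entry['comment_lines'] = comment
--         entry['blank_lines'] = blank
--         entry['code_lines'] = len(mine) - blank - comment
--
--     return function_loc
-- ===== Notes on version B (the rewrite author's own statement) =====
-- stated objective: alternative
-- what changed: B first buckets the raw lines per function (one grouping pass with setdefault/append), then computes each function's counts in aggregate over its bucket, deriving code lines by subtraction, instead of A's per-line increment of a nested counter dict with a three-way branch inside the loop.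
import Mathlib
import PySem

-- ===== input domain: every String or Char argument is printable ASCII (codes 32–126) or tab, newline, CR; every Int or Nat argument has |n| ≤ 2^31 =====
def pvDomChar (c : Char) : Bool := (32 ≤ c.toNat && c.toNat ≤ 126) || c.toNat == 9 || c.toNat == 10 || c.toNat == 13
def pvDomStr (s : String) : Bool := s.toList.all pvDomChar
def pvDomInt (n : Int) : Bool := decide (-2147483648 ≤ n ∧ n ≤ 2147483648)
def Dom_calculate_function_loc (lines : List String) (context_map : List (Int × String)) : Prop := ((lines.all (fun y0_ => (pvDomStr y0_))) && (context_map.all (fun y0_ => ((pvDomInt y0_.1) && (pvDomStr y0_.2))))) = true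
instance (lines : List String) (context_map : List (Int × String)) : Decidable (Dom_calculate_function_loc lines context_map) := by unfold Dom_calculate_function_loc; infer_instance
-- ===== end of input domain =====

-- B buckets the raw lines per function first, then computes each function's counts in one
-- aggregate pass (code lines by subtraction), instead of A's per-line mutation of nested
-- counters; Pre_ excludes the inputs where both raise KeyError (unseeded "MAIN").

-- ===== PORT A =====
def pvZero_calculate : PySem.Dict String Int :=
  PySem.Dict.ofList [("total_lines", 0), ("code_lines", 0), ("comment_lines", 0), ("blank_lines", 0)]

-- one iteration of A's "for line_num, line in enumerate(lines, 1)" loop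
def pvStepA (cmd : PySem.Dict Int String) (d : PySem.Dict String (PySem.Dict String Int))
    (p : Int × String) : PySem.Dict String (PySem.Dict String Int) :=
  let function_name := cmd.getD p.1 "MAIN"
  let stripped := PySem.Str.strip p.2
  let d := d.modify function_name PySem.Dict.empty (fun e => e.modify "total_lines" 0 (· + 1))
  if stripped == "" then
    d.modify function_name PySem.Dict.empty (fun e => e.modify "blank_lines" 0 (· + 1))
  else if PySem.Str.startswith stripped "/*" || PySem.Str.startswith stripped "//" then
    d.modify function_name PySem.Dict.empty (fun e => e.modify "comment_lines" 0 (· + 1))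
  else
    d.modify function_name PySem.Dict.empty (fun e => e.modify "code_lines" 0 (· + 1))

def calculate_function_loc (lines : List String) (context_map : List (Int × String)) : List (String × List (String × Int)) :=
  let cmd := PySem.Dict.ofList context_map
  let all_functions := PySem.Set.ofList cmd.values
  let function_loc : PySem.Dict String (PySem.Dict String Int) :=
    all_functions.foldl (fun d f => d.insert f pvZero_calculate) PySem.Dict.empty
  let function_loc := (PySem.List.enumerate lines 1).foldl (pvStepA cmd) function_loc
  function_loc.items.map (fun q => (q.1, q.2.items))

-- ===== PORT B =====
def pvBlank (l : String) : Bool := PySem.Str.strip l == ""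
def pvComment (l : String) : Bool :=
  PySem.Str.startswith (PySem.Str.strip l) "/*" || PySem.Str.startswith (PySem.Str.strip l) "//"

-- B's four in-place assignments to the (pre-seeded) entry of one function
-- (Dict.insert overwrites in place, exactly like entry[k] = v on an existing key)
def pvFill (mine : List String) (e : PySem.Dict String Int) : PySem.Dict String Int :=
  let blank : Int := (mine.filter (fun l => pvBlank l)).length
  let comment : Int := (mine.filter (fun l => pvComment l)).length
  let e := e.insert "total_lines" (mine.length : Int)
  let e := e.insert "comment_lines" comment
  let e := e.insert "blank_lines" blank
  e.insert "code_lines" ((mine.length : Int) - blank - comment)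

def calculate_function_loc_alt (lines : List String) (context_map : List (Int × String)) : List (String × List (String × Int)) :=
  let cmd := PySem.Dict.ofList context_map
  let function_loc : PySem.Dict String (PySem.Dict String Int) :=
    (PySem.Set.ofList cmd.values).foldl (fun d func => d.insert func pvZero_calculate) PySem.Dict.empty
  let buckets : PySem.Dict String (List String) :=
    (PySem.List.enumerate lines 1).foldl
      (fun b p => b.modify (cmd.getD p.1 "MAIN") [] (fun ls => ls ++ [p.2])) PySem.Dict.empty
  let function_loc := buckets.items.foldl
    (fun d q => d.modify q.1 PySem.Dict.empty (pvFill q.2)) function_loc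
  function_loc.items.map (fun q => (q.1, q.2.items))

-- ===== PRECONDITION & SPEC =====
-- Pre_ excludes exactly the inputs where A raises KeyError: some line's number is missing from
-- context_map while "MAIN" is not among context_map's values (so function_loc["MAIN"] was never seeded).
def Pre_calculate_function_loc (lines : List String) (context_map : List (Int × String)) : Prop :=
  "MAIN" ∈ (PySem.Dict.ofList context_map).values ∨
  ∀ i ∈ List.range lines.length, (PySem.Dict.ofList context_map).contains ((i : Int) + 1) = true
instance (lines : List String) (context_map : List (Int × String)) : Decidable (Pre_calculate_function_loc lines context_map) := by unfold Pre_calculate_function_loc; infer_instance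

def pvWitness_calculate_function_loc : List String × (List (Int × String)) := (["x = 1", "", "// c"], [(1, "f"), (2, "f"), (3, "g")])

def Spec_calculate_function_loc (lines : List String) (context_map : List (Int × String)) (out : List (String × List (String × Int))) : Prop := out = calculate_function_loc_alt lines context_map
instance (lines : List String) (context_map : List (Int × String)) (out : List (String × List (String × Int))) : Decidable (Spec_calculate_function_loc lines context_map out) := by unfold Spec_calculate_function_loc; infer_instance

-- ===== CLAIM (what is proved, stated in full; the proofs are below) =====
def Claim_equal_calculate_function_loc : Prop := ∀ (lines : List String) (context_map : List (Int × String)), Dom_calculate_function_loc lines context_map → Pre_calculate_function_loc lines context_map → Spec_calculate_function_loc lines context_map (calculate_function_loc lines context_map)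

-- ===== LEMMAS AND PROOFS =====

-- the combined effect of one A-iteration on the entry of the touched function
def pvEntryStep (e : PySem.Dict String Int) (l : String) : PySem.Dict String Int :=
  let e := e.modify "total_lines" 0 (· + 1)
  if pvBlank l then e.modify "blank_lines" 0 (· + 1)
  else if pvComment l then e.modify "comment_lines" 0 (· + 1)
  else e.modify "code_lines" 0 (· + 1)

theorem pvStepA_getD (cmd : PySem.Dict Int String) (d : PySem.Dict String (PySem.Dict String Int))
    (p : Int × String) (f : String) :
    (pvStepA cmd d p).getD f PySem.Dict.empty =
      if cmd.getD p.1 "MAIN" = f then pvEntryStep (d.getD f PySem.Dict.empty) p.2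
      else d.getD f PySem.Dict.empty := by
  unfold pvStepA pvEntryStep pvBlank pvComment
  by_cases hf : cmd.getD p.1 "MAIN" = f
  · simp only [hf, if_pos]
    split_ifs <;> simp [PySem.Dict.getD_modify_self]
  · simp only [hf, if_false]
    split_ifs <;> simp [PySem.Dict.getD_modify_of_ne _ _ _ (Ne.symm hf)]

theorem pvStepA_keys (cmd : PySem.Dict Int String) (d : PySem.Dict String (PySem.Dict String Int))
    (p : Int × String) (h : cmd.getD p.1 "MAIN" ∈ d.keys) : (pvStepA cmd d p).keys = d.keys := by
  have hc : d.contains (cmd.getD p.1 "MAIN") = true := by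
    rw [PySem.Dict.contains_eq_decide_mem_keys]; simpa using h
  unfold pvStepA
  have h2 : ∀ (g g' : PySem.Dict String Int → PySem.Dict String Int),
      ((d.modify (cmd.getD p.1 "MAIN") PySem.Dict.empty g).modify (cmd.getD p.1 "MAIN") PySem.Dict.empty g').keys = d.keys := by
    intro g g'
    rw [PySem.Dict.keys_modify, PySem.Dict.keys_insert_of_contains, PySem.Dict.keys_modify,
      PySem.Dict.keys_insert_of_contains _ _ hc]
    simp [PySem.Dict.contains_modify]
  dsimp only
  split_ifs <;> apply h2

theorem pvStepA_foldl_getD (cmd : PySem.Dict Int String) (l : List (Int × String))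
    (d : PySem.Dict String (PySem.Dict String Int)) (f : String) :
    (l.foldl (pvStepA cmd) d).getD f PySem.Dict.empty =
      ((l.filter (fun p => cmd.getD p.1 "MAIN" == f)).map (·.2)).foldl pvEntryStep
        (d.getD f PySem.Dict.empty) := by
  induction l generalizing d with
  | nil => simp
  | cons p t ih =>
    simp only [List.foldl_cons, List.filter_cons]
    rw [ih, pvStepA_getD]
    by_cases hf : cmd.getD p.1 "MAIN" = f <;> simp [hf]

theorem pvStepA_foldl_keys (cmd : PySem.Dict Int String) (l : List (Int × String))
    (d : PySem.Dict String (PySem.Dict String Int))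
    (h : ∀ p ∈ l, cmd.getD p.1 "MAIN" ∈ d.keys) : (l.foldl (pvStepA cmd) d).keys = d.keys := by
  induction l generalizing d with
  | nil => simp
  | cons p t ih =>
    have hk := pvStepA_keys cmd d p (h p (by simp))
    simp only [List.foldl_cons]
    rw [ih _ (fun q hq => by rw [hk]; exact h q (by simp [hq])), hk]

theorem pvInit_getD (l : List String) (d : PySem.Dict String (PySem.Dict String Int))
    (z : PySem.Dict String Int) (f : String) :
    (l.foldl (fun d x => d.insert x z) d).getD f PySem.Dict.empty =
      if f ∈ l then z else d.getD f PySem.Dict.empty := by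
  induction l generalizing d with
  | nil => simp
  | cons x t ih =>
    simp only [List.foldl_cons, ih, List.mem_cons]
    by_cases hx : f ∈ t
    · simp [hx]
    · by_cases hf : f = x
      · simp [hf, PySem.Dict.getD_insert_self]
      · simp [hx, hf, PySem.Dict.getD_insert_of_ne _ _ _ hf]

theorem pvBlank_not_comment (l : String) (h : pvBlank l = true) : pvComment l = false := by
  unfold pvBlank at h
  unfold pvComment
  rw [eq_of_beq h]
  decide

theorem pvPartition (ls : List String) :
    ls.countP pvBlank + ls.countP pvComment
      + ls.countP (fun l => !pvBlank l && !pvComment l) = ls.length := by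
  induction ls with
  | nil => simp
  | cons x t ih =>
    simp only [List.countP_cons, List.length_cons]
    by_cases hb : pvBlank x
    · simp [hb, pvBlank_not_comment x hb]; omega
    · by_cases hc : pvComment x <;> simp [hb, hc] <;> omega

theorem pvEntryStep_foldl (ls : List String) (a b c d2 : Int) :
    ls.foldl pvEntryStep (PySem.Dict.mk [("total_lines", a), ("code_lines", b), ("comment_lines", c), ("blank_lines", d2)]) =
      PySem.Dict.mk [("total_lines", a + ls.length),
        ("code_lines", b + (ls.countP (fun l => !pvBlank l && !pvComment l) : Int)),
        ("comment_lines", c + (ls.countP pvComment : Int)),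
        ("blank_lines", d2 + (ls.countP pvBlank : Int))] := by
  induction ls generalizing a b c d2 with
  | nil => simp
  | cons x t ih =>
    simp only [List.foldl_cons, List.countP_cons, List.length_cons]
    have hstep : pvEntryStep (PySem.Dict.mk [("total_lines", a), ("code_lines", b), ("comment_lines", c), ("blank_lines", d2)]) x =
        if pvBlank x then PySem.Dict.mk [("total_lines", a+1), ("code_lines", b), ("comment_lines", c), ("blank_lines", d2+1)]
        else if pvComment x then PySem.Dict.mk [("total_lines", a+1), ("code_lines", b), ("comment_lines", c+1), ("blank_lines", d2)]
        else PySem.Dict.mk [("total_lines", a+1), ("code_lines", b+1), ("comment_lines", c), ("blank_lines", d2)] := by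
      unfold pvEntryStep
      split_ifs <;>
        simp [PySem.Dict.modify, PySem.Dict.insert, PySem.Dict.get?, PySem.Dict.getD]
    rw [hstep]
    by_cases hb : pvBlank x
    · have hc := pvBlank_not_comment x hb
      simp only [hb, hc, if_true, if_false, Bool.not_true, Bool.false_and, Bool.not_false,
          Bool.and_false, Bool.true_and, Bool.and_true, Bool.and_self, Bool.false_eq_true, reduceIte]
      rw [ih]
      simp only [PySem.Dict.mk.injEq, List.cons.injEq, Prod.mk.injEq, and_true, true_and]
      push_cast
      omega
    · rw [Bool.not_eq_true] at hb
      by_cases hc : pvComment x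
      · simp only [hb, hc, if_true, if_false, Bool.not_true, Bool.false_and, Bool.not_false,
          Bool.and_false, Bool.true_and, Bool.and_true, Bool.and_self, Bool.false_eq_true, reduceIte]
        rw [ih]
        simp only [PySem.Dict.mk.injEq, List.cons.injEq, Prod.mk.injEq, and_true, true_and]
        push_cast
        omega
      · rw [Bool.not_eq_true] at hc
        simp only [hb, hc, if_true, if_false, Bool.not_true, Bool.false_and, Bool.not_false,
          Bool.and_false, Bool.true_and, Bool.and_true, Bool.and_self, Bool.false_eq_true, reduceIte]
        rw [ih]
        simp only [PySem.Dict.mk.injEq, List.cons.injEq, Prod.mk.injEq, and_true, true_and]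
        push_cast
        omega

theorem pvGetD_mem_values (cmd : PySem.Dict Int String) (k : Int) (dflt : String)
    (h : cmd.contains k = true) : cmd.getD k dflt ∈ cmd.values := by
  rw [PySem.Dict.contains_eq_isSome_get?] at h
  obtain ⟨v, hv⟩ := Option.isSome_iff_exists.mp h
  rw [PySem.Dict.getD_eq_get?_getD, hv]
  simp only [Option.getD_some]
  have := PySem.Dict.mem_items_of_get?_eq_some cmd hv
  simp only [PySem.Dict.values]
  exact List.mem_map.mpr ⟨(k, v), this, rfl⟩

theorem pvZero_eq : pvZero_calculate = PySem.Dict.mk [("total_lines", 0), ("code_lines", 0), ("comment_lines", 0), ("blank_lines", 0)] := by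
  decide


theorem pvBuckets_getD (cmd : PySem.Dict Int String) (l : List (Int × String))
    (b : PySem.Dict String (List String)) (f : String) :
    (l.foldl (fun b p => b.modify (cmd.getD p.1 "MAIN") [] (fun ls => ls ++ [p.2])) b).getD f []
      = b.getD f [] ++ (l.filter (fun p => cmd.getD p.1 "MAIN" == f)).map (·.2) := by
  induction l generalizing b with
  | nil => simp
  | cons p t ih =>
    simp only [List.foldl_cons, List.filter_cons]
    rw [ih]
    by_cases hf : cmd.getD p.1 "MAIN" = f
    · rw [hf, PySem.Dict.getD_modify_self]
      simp [hf]
    · rw [PySem.Dict.getD_modify_of_ne _ _ _ (Ne.symm hf)]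
      simp [hf]

theorem pvApply_getD_not_mem (its : List (String × List String))
    (d : PySem.Dict String (PySem.Dict String Int)) (f : String) (h : f ∉ its.map (·.1)) :
    (its.foldl (fun d q => d.modify q.1 PySem.Dict.empty (pvFill q.2)) d).getD f PySem.Dict.empty
      = d.getD f PySem.Dict.empty := by
  induction its generalizing d with
  | nil => simp
  | cons q t ih =>
    simp only [List.map_cons, List.mem_cons, not_or] at h
    simp only [List.foldl_cons]
    rw [ih _ h.2, PySem.Dict.getD_modify_of_ne _ _ _ h.1]

theorem pvApply_getD_mem (its : List (String × List String))
    (d : PySem.Dict String (PySem.Dict String Int)) (f : String) (v : List String)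
    (hnd : (its.map (·.1)).Nodup) (h : (f, v) ∈ its) :
    (its.foldl (fun d q => d.modify q.1 PySem.Dict.empty (pvFill q.2)) d).getD f PySem.Dict.empty
      = pvFill v (d.getD f PySem.Dict.empty) := by
  induction its generalizing d with
  | nil => simp at h
  | cons q t ih =>
    simp only [List.map_cons, List.nodup_cons] at hnd
    rcases List.mem_cons.mp h with hq | ht
    · have hfq : f = q.1 := by rw [← hq]
      have hnf : f ∉ t.map (·.1) := by rw [hfq]; exact hnd.1
      simp only [List.foldl_cons]
      rw [pvApply_getD_not_mem _ _ _ hnf, hfq, PySem.Dict.getD_modify_self, ← hq]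
    · have hne : f ≠ q.1 := by
        intro hfq
        exact hnd.1 (hfq ▸ List.mem_map.mpr ⟨(f, v), ht, rfl⟩)
      simp only [List.foldl_cons]
      rw [ih _ hnd.2 ht, PySem.Dict.getD_modify_of_ne _ _ _ hne]

theorem pvApply_keys (its : List (String × List String))
    (d : PySem.Dict String (PySem.Dict String Int)) (h : ∀ q ∈ its, q.1 ∈ d.keys) :
    (its.foldl (fun d q => d.modify q.1 PySem.Dict.empty (pvFill q.2)) d).keys = d.keys := by
  induction its generalizing d with
  | nil => simp
  | cons q t ih =>
    have hc : d.contains q.1 = true := by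
      rw [PySem.Dict.contains_eq_decide_mem_keys]; simpa using h q (by simp)
    have hk : (d.modify q.1 PySem.Dict.empty (pvFill q.2)).keys = d.keys := by
      rw [PySem.Dict.keys_modify, PySem.Dict.keys_insert_of_contains _ _ hc]
    simp only [List.foldl_cons]
    rw [ih _ (fun r hr => by rw [hk]; exact h r (by simp [hr])), hk]

theorem pvFill_zero (mine : List String) :
    pvFill mine (PySem.Dict.mk [("total_lines", 0), ("code_lines", 0), ("comment_lines", 0), ("blank_lines", 0)]) =
      PySem.Dict.mk [("total_lines", (mine.length : Int)),
        ("code_lines", (mine.length : Int) - ((mine.filter (fun l => pvBlank l)).length : Int)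
          - ((mine.filter (fun l => pvComment l)).length : Int)),
        ("comment_lines", ((mine.filter (fun l => pvComment l)).length : Int)),
        ("blank_lines", ((mine.filter (fun l => pvBlank l)).length : Int))] := by
  unfold pvFill
  simp [PySem.Dict.insert, PySem.Dict.get?]


-- ===== VERDICT (by name: the statement is the Claim_ definition above) =====
theorem calculate_function_loc_spec : Claim_equal_calculate_function_loc := by
  intro lines context_map _ hPre
  unfold Spec_calculate_function_loc calculate_function_loc calculate_function_loc_alt
  dsimp only
  set cmd := PySem.Dict.ofList context_map with hcmd
  set names := PySem.Set.ofList cmd.values with hnames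
  set E := PySem.List.enumerate lines 1 with hE
  -- every line's function name is seeded
  have hmem : ∀ p ∈ E, cmd.getD p.1 "MAIN" ∈ names := by
    intro p hp
    rw [hE, PySem.List.mem_enumerate_iff] at hp
    obtain ⟨k, hk, rfl⟩ := hp
    by_cases hc : cmd.contains (1 + (k : Int)) = true
    · exact (PySem.Set.mem_ofList _ _).mpr (pvGetD_mem_values cmd _ _ hc)
    · rcases hPre with hm | hall
      · rw [PySem.Dict.getD_of_not_contains _ _ (by simpa using hc)]
        exact (PySem.Set.mem_ofList _ _).mpr hm
      · exfalso
        have := hall k (List.mem_range.mpr hk)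
        rw [show ((k : Int) + 1) = 1 + (k : Int) by ring] at this
        exact hc this
  have hnodup : names.Nodup := PySem.Set.nodup_ofList _
  -- keys of the seeded dict (built identically by both programs)
  have hkeysInit : ((names.foldl (fun d f => d.insert f pvZero_calculate) PySem.Dict.empty :
      PySem.Dict String (PySem.Dict String Int))).keys = names := by
    rw [PySem.Dict.keys_foldl_insert (f := fun _ _ => pvZero_calculate)]
    have : (PySem.Dict.empty : PySem.Dict String (PySem.Dict String Int)).keys = [] := rfl
    rw [this, PySem.Set.update_nil_left, hnames, PySem.Set.ofList_ofList]
  -- B's buckets: keys and per-function contents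
  set buckets : PySem.Dict String (List String) :=
    E.foldl (fun b p => b.modify (cmd.getD p.1 "MAIN") [] (fun ls => ls ++ [p.2]))
      PySem.Dict.empty with hbuckets
  have hbkeys : buckets.keys = PySem.Set.ofList (E.map (fun p => cmd.getD p.1 "MAIN")) := by
    rw [hbuckets, PySem.Dict.keys_foldl_modify_key E (fun p => cmd.getD p.1 "MAIN") []
      (fun _ p ls => ls ++ [p.2]) PySem.Dict.empty]
    have : (PySem.Dict.empty : PySem.Dict String (List String)).keys = [] := rfl
    rw [this, PySem.Set.update_nil_left]
  have hbkeys_sub : ∀ q ∈ buckets.items, q.1 ∈ names := by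
    intro q hq
    have : q.1 ∈ buckets.keys := PySem.Dict.mem_keys_of_mem_items _ hq
    rw [hbkeys] at this
    obtain ⟨p, hp, hpv⟩ := List.mem_map.mp ((PySem.Set.mem_ofList _ _).mp this)
    exact hpv ▸ hmem p hp
  have hbnodup : buckets.keys.Nodup := by rw [hbkeys]; exact PySem.Set.nodup_ofList _
  -- keys of A's final dict
  have hkeysFinal : ((E.foldl (pvStepA cmd)
      (names.foldl (fun d f => d.insert f pvZero_calculate) PySem.Dict.empty))).keys = names := by
    rw [pvStepA_foldl_keys cmd E _ (by rw [hkeysInit]; exact hmem), hkeysInit]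
  -- keys of B's final dict
  have hkeysFinalB : ((buckets.items.foldl (fun d q => d.modify q.1 PySem.Dict.empty (pvFill q.2))
      (names.foldl (fun d f => d.insert f pvZero_calculate) PySem.Dict.empty))).keys = names := by
    rw [pvApply_keys _ _ (fun q hq => by rw [hkeysInit]; exact hbkeys_sub q hq), hkeysInit]
  -- both sides as a map over names
  rw [PySem.Dict.items_eq_map_keys _ (by rw [hkeysFinal]; exact hnodup) PySem.Dict.empty,
    hkeysFinal,
    PySem.Dict.items_eq_map_keys _ (by rw [hkeysFinalB]; exact hnodup) PySem.Dict.empty,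
    hkeysFinalB]
  simp only [List.map_map]
  apply List.map_congr_left
  intro f hf
  simp only [Function.comp]
  congr 1
  -- A's entry at f
  rw [pvStepA_foldl_getD, pvInit_getD, if_pos hf, pvZero_eq, pvEntryStep_foldl]
  set ls := (E.filter (fun p => cmd.getD p.1 "MAIN" == f)).map (·.2) with hls
  -- B's bucket at f holds exactly those lines
  have hbget : buckets.getD f [] = ls := by
    rw [hbuckets, pvBuckets_getD]
    rfl
  by_cases hfb : f ∈ buckets.keys
  · -- f received lines: B overwrote its entry from the bucket
    obtain ⟨q, hq, hq1⟩ := List.mem_map.mp hfb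
    have hmemit : (f, q.2) ∈ buckets.items := by
      rw [← hq1]; exact hq
    have hv : q.2 = ls := by
      rw [← hbget, PySem.Dict.getD_of_mem_items _ hmemit hbnodup []]
    rw [pvApply_getD_mem _ _ _ _ (by exact hbnodup) hmemit, hv, pvInit_getD, if_pos hf, pvFill_zero]
    simp only [PySem.Dict.mk.injEq, List.cons.injEq, Prod.mk.injEq, and_true, true_and]
    have hpart := pvPartition ls
    have h1 : (ls.filter (fun l => pvBlank l)).length = ls.countP pvBlank :=
      Eq.symm List.countP_eq_length_filter
    have h2 : (ls.filter (fun l => pvComment l)).length = ls.countP pvComment :=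
      Eq.symm List.countP_eq_length_filter
    refine ⟨by omega, ?_, by rw [h2]; push_cast; ring, by rw [h1]; push_cast; ring⟩
    rw [h1, h2]
    push_cast
    omega
  · -- f received no lines: both sides keep the zero entry
    have hnil : ls = [] := by
      rw [← hbget, PySem.Dict.getD_of_not_contains]
      rw [PySem.Dict.contains_eq_decide_mem_keys]
      simpa using hfb
    rw [pvApply_getD_not_mem _ _ _ (by exact hfb), pvInit_getD, if_pos hf, hnil]
    simp
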